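-- pv_equiv track=rewrite | github.com/stephenpickering79-tech/Scoring-zone-website | content-command-centre/media_processor.py | _make_stat
-- ===== SOURCE A (Python) =====
-- def _make_stat(topic_lower: str) -> tuple[str, str]:
--     # Putting
--     if any(w in topic_lower for w in ["3-putt", "3 putt", "three putt"]):
--         return "84%", "of amateurs 3-putt from outside 20 ft"
--     if any(w in topic_lower for w in ["lag putt", "lag"]):
--         return "62%", "of 3-putts start from poor lag distance"
--     if any(w in topic_lower for w in ["putt", "green", "hole"]):
--         return "43%", "of all golf strokes are putts"
--     # Chipping
--     if any(w in topic_lower for w in ["bump", "run"]):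
--         return "80%", "of chips should be bump & runs"
--     if any(w in topic_lower for w in ["flop", "lob"]):
--         return "1 in 5", "amateurs can execute a flop shot"
--     if any(w in topic_lower for w in ["up and down", "up & down", "scrambl"]):
--         return "18%", "amateur up-and-down success rate"
--     if any(w in topic_lower for w in ["chip", "around the green", "short game"]):
--         return "60%", "of shots occur within 100 yards"
--     # Pitching
--     if any(w in topic_lower for w in ["pitch", "wedge", "100 yard", "distance control"]):
--         return "67%", "of all shots happen inside 100 yds"
--     # Bunker
--     if any(w in topic_lower for w in ["bunker", "sand"]):
--         return "2\"", "behind the ball · every single time"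
--     # Pressure
--     if any(w in topic_lower for w in ["pressure", "mental", "nerves", "tournament"]):
--         return "3.2", "avg strokes saved with pressure practice"
--     # Driving
--     if any(w in topic_lower for w in ["driv", "distance", "carry", "tee shot", "driver"]):
--         return "41 yds", "average gap: amateur vs tour pro"
--     # Iron
--     if any(w in topic_lower for w in ["iron", "approach", "ball striking", "fairway"]):
--         return "68%", "of amateurs miss greens on approach"
--     # Handicap
--     if any(w in topic_lower for w in ["handicap", "hcp", "scoring", "score"]):
--         return "3.2", "avg stroke improvement with Scoring Zone"
--     # Default
--     return "50+", "scored drills to pressure test your short game"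
-- ===== SOURCE B (Python) =====
-- _RESULTS = [
--     ("84%", "of amateurs 3-putt from outside 20 ft"),
--     ("62%", "of 3-putts start from poor lag distance"),
--     ("43%", "of all golf strokes are putts"),
--     ("80%", "of chips should be bump & runs"),
--     ("1 in 5", "amateurs can execute a flop shot"),
--     ("18%", "amateur up-and-down success rate"),
--     ("60%", "of shots occur within 100 yards"),
--     ("67%", "of all shots happen inside 100 yds"),
--     ('2"', "behind the ball \u00b7 every single time"),
--     ("3.2", "avg strokes saved with pressure practice"),
--     ("41 yds", "average gap: amateur vs tour pro"),
--     ("68%", "of amateurs miss greens on approach"),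
--     ("3.2", "avg stroke improvement with Scoring Zone"),
--     ("50+", "scored drills to pressure test your short game"),
-- ]
--
-- # flat keyword -> priority rank; the answer is the result of the LOWEST rank
-- # whose keyword occurs in the topic (default rank 13 if none occurs)
-- _PRIORITY = {
--     "3-putt": 0, "3 putt": 0, "three putt": 0,
--     "lag putt": 1, "lag": 1,
--     "putt": 2, "green": 2, "hole": 2,
--     "bump": 3, "run": 3,
--     "flop": 4, "lob": 4,
--     "up and down": 5, "up & down": 5, "scrambl": 5,
--     "chip": 6, "around the green": 6, "short game": 6,
--     "pitch": 7, "wedge": 7, "100 yard": 7, "distance control": 7,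
--     "bunker": 8, "sand": 8,
--     "pressure": 9, "mental": 9, "nerves": 9, "tournament": 9,
--     "driv": 10, "distance": 10, "carry": 10, "tee shot": 10, "driver": 10,
--     "iron": 11, "approach": 11, "ball striking": 11, "fairway": 11,
--     "handicap": 12, "hcp": 12, "scoring": 12, "score": 12,
-- }
--
--
-- def _make_stat(topic_lower: str) -> tuple[str, str]:
--     best = len(_RESULTS) - 1
--     for keyword, rank in _PRIORITY.items():
--         if rank < best and keyword in topic_lower:
--             best = rank
--     return _RESULTS[best]
-- ===== Notes on version B (the rewrite author's own statement) =====
-- stated objective: alternative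
-- what changed: Replaces the 13-branch first-match if-ladder by a flat keyword-to-priority map scanned once taking the minimum matching rank, which then indexes a results table (default = last entry).
import Mathlib
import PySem

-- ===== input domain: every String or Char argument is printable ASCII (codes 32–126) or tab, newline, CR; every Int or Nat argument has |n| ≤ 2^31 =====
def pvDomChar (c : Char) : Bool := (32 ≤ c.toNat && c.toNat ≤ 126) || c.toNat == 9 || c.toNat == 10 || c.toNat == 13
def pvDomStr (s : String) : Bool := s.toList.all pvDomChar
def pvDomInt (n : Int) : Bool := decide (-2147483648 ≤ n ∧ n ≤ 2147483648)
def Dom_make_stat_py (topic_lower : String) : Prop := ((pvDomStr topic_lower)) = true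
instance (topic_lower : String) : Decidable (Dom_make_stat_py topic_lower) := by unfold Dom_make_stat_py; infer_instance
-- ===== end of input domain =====

-- B replaces A's 13-branch first-match if-ladder by a flat keyword→priority map scanned once
-- taking the minimum matching rank, which indexes a results table (objective: alternative).

-- ===== PORT A =====
def make_stat_py (topic_lower : String) : String × String :=
  if ["3-putt", "3 putt", "three putt"].any (fun w => PySem.Str.isIn w topic_lower) then
    ("84%", "of amateurs 3-putt from outside 20 ft")
  else if ["lag putt", "lag"].any (fun w => PySem.Str.isIn w topic_lower) then
    ("62%", "of 3-putts start from poor lag distance")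
  else if ["putt", "green", "hole"].any (fun w => PySem.Str.isIn w topic_lower) then
    ("43%", "of all golf strokes are putts")
  else if ["bump", "run"].any (fun w => PySem.Str.isIn w topic_lower) then
    ("80%", "of chips should be bump & runs")
  else if ["flop", "lob"].any (fun w => PySem.Str.isIn w topic_lower) then
    ("1 in 5", "amateurs can execute a flop shot")
  else if ["up and down", "up & down", "scrambl"].any (fun w => PySem.Str.isIn w topic_lower) then
    ("18%", "amateur up-and-down success rate")
  else if ["chip", "around the green", "short game"].any (fun w => PySem.Str.isIn w topic_lower) then
    ("60%", "of shots occur within 100 yards")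
  else if ["pitch", "wedge", "100 yard", "distance control"].any (fun w => PySem.Str.isIn w topic_lower) then
    ("67%", "of all shots happen inside 100 yds")
  else if ["bunker", "sand"].any (fun w => PySem.Str.isIn w topic_lower) then
    ("2\"", "behind the ball · every single time")
  else if ["pressure", "mental", "nerves", "tournament"].any (fun w => PySem.Str.isIn w topic_lower) then
    ("3.2", "avg strokes saved with pressure practice")
  else if ["driv", "distance", "carry", "tee shot", "driver"].any (fun w => PySem.Str.isIn w topic_lower) then
    ("41 yds", "average gap: amateur vs tour pro")
  else if ["iron", "approach", "ball striking", "fairway"].any (fun w => PySem.Str.isIn w topic_lower) then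
    ("68%", "of amateurs miss greens on approach")
  else if ["handicap", "hcp", "scoring", "score"].any (fun w => PySem.Str.isIn w topic_lower) then
    ("3.2", "avg stroke improvement with Scoring Zone")
  else
    ("50+", "scored drills to pressure test your short game")

-- ===== PORT B =====
-- the results table; entry 13 is the default
def pvResults : List (String × String) :=
  [ ("84%", "of amateurs 3-putt from outside 20 ft"),
    ("62%", "of 3-putts start from poor lag distance"),
    ("43%", "of all golf strokes are putts"),
    ("80%", "of chips should be bump & runs"),
    ("1 in 5", "amateurs can execute a flop shot"),
    ("18%", "amateur up-and-down success rate"),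
    ("60%", "of shots occur within 100 yards"),
    ("67%", "of all shots happen inside 100 yds"),
    ("2\"", "behind the ball · every single time"),
    ("3.2", "avg strokes saved with pressure practice"),
    ("41 yds", "average gap: amateur vs tour pro"),
    ("68%", "of amateurs miss greens on approach"),
    ("3.2", "avg stroke improvement with Scoring Zone"),
    ("50+", "scored drills to pressure test your short game") ]

-- the flat keyword → priority-rank map, in Source B's insertion order
def pvPriority : List (String × Nat) :=
  [ ("3-putt", 0), ("3 putt", 0), ("three putt", 0),
    ("lag putt", 1), ("lag", 1),
    ("putt", 2), ("green", 2), ("hole", 2),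
    ("bump", 3), ("run", 3),
    ("flop", 4), ("lob", 4),
    ("up and down", 5), ("up & down", 5), ("scrambl", 5),
    ("chip", 6), ("around the green", 6), ("short game", 6),
    ("pitch", 7), ("wedge", 7), ("100 yard", 7), ("distance control", 7),
    ("bunker", 8), ("sand", 8),
    ("pressure", 9), ("mental", 9), ("nerves", 9), ("tournament", 9),
    ("driv", 10), ("distance", 10), ("carry", 10), ("tee shot", 10), ("driver", 10),
    ("iron", 11), ("approach", 11), ("ball striking", 11), ("fairway", 11),
    ("handicap", 12), ("hcp", 12), ("scoring", 12), ("score", 12) ]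

-- the loop body: keep the lowest matching rank
def pvStep (topic_lower : String) (best : Nat) (p : String × Nat) : Nat :=
  if decide (p.2 < best) && PySem.Str.isIn p.1 topic_lower then p.2 else best

def make_stat_py_alt (topic_lower : String) : String × String :=
  let best := pvPriority.foldl (pvStep topic_lower) (pvResults.length - 1)
  -- _RESULTS[best]: best ≤ 13 always, so the index is in range; getD's default is never used
  pvResults.getD best ("", "")

-- ===== PRECONDITION & SPEC =====
def Spec_make_stat_py (topic_lower : String) (out : String × String) : Prop := out = make_stat_py_alt topic_lower
instance (topic_lower : String) (out : String × String) : Decidable (Spec_make_stat_py topic_lower out) := by unfold Spec_make_stat_py; infer_instance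

-- ===== CLAIM (what is proved, stated in full; the proofs are below) =====
def Claim_equal_make_stat_py : Prop := ∀ (topic_lower : String), Dom_make_stat_py topic_lower → Spec_make_stat_py topic_lower (make_stat_py topic_lower)

-- ===== LEMMAS AND PROOFS =====

-- proof-only view of A as an ordered rule table
def pvRules : List (List String × (String × String)) :=
  [ (["3-putt", "3 putt", "three putt"], ("84%", "of amateurs 3-putt from outside 20 ft")),
    (["lag putt", "lag"], ("62%", "of 3-putts start from poor lag distance")),
    (["putt", "green", "hole"], ("43%", "of all golf strokes are putts")),
    (["bump", "run"], ("80%", "of chips should be bump & runs")),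
    (["flop", "lob"], ("1 in 5", "amateurs can execute a flop shot")),
    (["up and down", "up & down", "scrambl"], ("18%", "amateur up-and-down success rate")),
    (["chip", "around the green", "short game"], ("60%", "of shots occur within 100 yards")),
    (["pitch", "wedge", "100 yard", "distance control"], ("67%", "of all shots happen inside 100 yds")),
    (["bunker", "sand"], ("2\"", "behind the ball · every single time")),
    (["pressure", "mental", "nerves", "tournament"], ("3.2", "avg strokes saved with pressure practice")),
    (["driv", "distance", "carry", "tee shot", "driver"], ("41 yds", "average gap: amateur vs tour pro")),
    (["iron", "approach", "ball striking", "fairway"], ("68%", "of amateurs miss greens on approach")),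
    (["handicap", "hcp", "scoring", "score"], ("3.2", "avg stroke improvement with Scoring Zone")) ]

-- pvStep with the membership predicate abstracted (keeps simp from unfolding isIn)
def pvStepF (f : String → Bool) (best : Nat) (p : String × Nat) : Nat :=
  if decide (p.2 < best) && f p.1 then p.2 else best

theorem pvStep_eq (t : String) : pvStep t = pvStepF (fun w => PySem.Str.isIn w t) := rfl

def pvPairsFrom (n : Nat) : List (List String × (String × String)) → List (String × Nat)
  | [] => []
  | (kws, _) :: rest => kws.map (fun k => (k, n)) ++ pvPairsFrom (n + 1) rest

def pvFirstIdx (f : String → Bool) : List (List String × (String × String)) → Nat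
  | [] => 0
  | (kws, _) :: rest => if kws.any f then 0 else pvFirstIdx f rest + 1

def pvScanR (f : String → Bool) (d : String × String) :
    List (List String × (String × String)) → String × String
  | [] => d
  | (kws, r) :: rest => if kws.any f then r else pvScanR f d rest

theorem pvFoldGroup (f : String → Bool) (kws : List String) (n : Nat) :
    ∀ best, List.foldl (pvStepF f) best (kws.map (fun k => (k, n))) =
      if decide (n < best) && kws.any f then n else best := by
  induction kws with
  | nil => intro best; simp
  | cons k ks ih =>
      intro best
      rw [List.map_cons, List.foldl_cons, ih]
      simp only [pvStepF, List.any_cons]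
      by_cases h1 : n < best
      · by_cases h2 : f k = true
        · simp [h1, h2]
        · simp [h1, h2]
      · simp [h1]

theorem pvFoldSkip (f : String → Bool) (rest : List (List String × (String × String))) :
    ∀ n best, best ≤ n → List.foldl (pvStepF f) best (pvPairsFrom n rest) = best := by
  induction rest with
  | nil => intro n best _; simp [pvPairsFrom]
  | cons g rest ih =>
      intro n best h
      obtain ⟨kws, r⟩ := g
      rw [pvPairsFrom, List.foldl_append, pvFoldGroup]
      have hn : ¬ n < best := by omega
      simp only [hn, decide_false, Bool.false_and]
      exact ih (n + 1) best (by omega)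

theorem pvFoldMin (f : String → Bool) (rest : List (List String × (String × String))) :
    ∀ n, List.foldl (pvStepF f) (n + rest.length) (pvPairsFrom n rest) = n + pvFirstIdx f rest := by
  induction rest with
  | nil => intro n; simp [pvPairsFrom, pvFirstIdx]
  | cons g rest ih =>
      intro n
      obtain ⟨kws, r⟩ := g
      rw [pvPairsFrom, List.foldl_append, pvFoldGroup]
      simp only [pvFirstIdx, List.length_cons]
      have hlt : n < n + (rest.length + 1) := by omega
      by_cases h2 : kws.any f = true
      · simp only [hlt, decide_true, h2, Bool.and_true, if_true]
        rw [pvFoldSkip f rest (n + 1) n (by omega)]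
        omega
      · simp only [h2, Bool.and_false, if_false, Bool.false_eq_true]
        have he : n + (rest.length + 1) = (n + 1) + rest.length := by omega
        rw [he, ih (n + 1)]
        omega

theorem pvFirstIdx_le (f : String → Bool) (rules : List (List String × (String × String))) :
    pvFirstIdx f rules ≤ rules.length := by
  induction rules with
  | nil => simp [pvFirstIdx]
  | cons g rest ih =>
      obtain ⟨kws, r⟩ := g
      simp only [pvFirstIdx, List.length_cons]
      split <;> omega

theorem pvScan_getD (f : String → Bool) (d : String × String) :
    ∀ rules : List (List String × (String × String)),
      pvScanR f d rules = (rules.map Prod.snd ++ [d]).getD (pvFirstIdx f rules) d := by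
  intro rules
  induction rules with
  | nil => simp [pvScanR, pvFirstIdx]
  | cons g rest ih =>
      obtain ⟨kws, r⟩ := g
      simp only [pvScanR, pvFirstIdx, List.map_cons, List.cons_append]
      by_cases h : kws.any f = true
      · simp [h]
      · simp only [h, if_false, Bool.false_eq_true, List.getD_cons_succ]
        exact ih

-- ===== VERDICT (by name: the statement is the Claim_ definition above) =====
theorem make_stat_py_spec : Claim_equal_make_stat_py := by
  intro t _
  show make_stat_py t = make_stat_py_alt t
  have hA : make_stat_py t =
      pvScanR (fun w => PySem.Str.isIn w t)
        ("50+", "scored drills to pressure test your short game") pvRules := by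
    simp only [make_stat_py, pvScanR, pvRules]
  have hbest : List.foldl (pvStep t) (pvResults.length - 1) pvPriority =
      pvFirstIdx (fun w => PySem.Str.isIn w t) pvRules := by
    rw [pvStep_eq]
    have hp : pvPriority = pvPairsFrom 0 pvRules := by rfl
    have hl : pvResults.length - 1 = 0 + pvRules.length := by rfl
    rw [hp, hl, pvFoldMin]
    omega
  have hle : pvFirstIdx (fun w => PySem.Str.isIn w t) pvRules ≤ 13 :=
    pvFirstIdx_le _ pvRules
  rw [hA, pvScan_getD]
  show pvResults.getD _ ("50+", "scored drills to pressure test your short game") =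
    make_stat_py_alt t
  simp only [make_stat_py_alt, hbest]
  have h14 : pvResults.length = 14 := rfl
  rw [List.getD_eq_getElem _ _ (by rw [h14]; omega),
      List.getD_eq_getElem _ _ (by rw [h14]; omega)]
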